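-- pv_equiv track=rewrite | github.com/kevteg/files-cluster | backend/write.py | getConnectionInfo
-- ===== SOURCE A (Python) =====
-- import binascii
--
-- def getConnectionInfo(group_name):
--     ip = None
--     port = None
--     if len(group_name) > 5:
--         text = (binascii.hexlify(group_name.encode('utf-8')).decode())
--         port = int('0x' + text[len(text) - 4:len(text)], 0)
--         port = port + 5000
--         cafe = 'cafe'
--         ip = "ff05"
--         index = 0
--         lon = len(text)
--         if lon > 29:
--             text = text[0:28]
--
--         for i in range(1, 29 - lon):
--             text += cafe[index]
--             index = 0 if not i%4 else index + 1
--
--         for index, i in enumerate(text, start = 0):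
--             ip += i if index%4 else ':' + i
--
--     return ip, port
-- ===== SOURCE B (Python) =====
-- def getConnectionInfo(group_name):
--     if len(group_name) <= 5:
--         return None, None
--     text = group_name.encode('utf-8').hex()
--     port = int(text[-4:], 16) + 5000
--     if len(text) > 29:
--         text = text[:28]
--     else:
--         text += ('cafe' * 7)[:28 - len(text)]
--     ip = 'ff05:' + ':'.join(text[i:i + 4] for i in range(0, 28, 4))
--     return ip, port
-- ===== Notes on version B (the rewrite author's own statement) =====
-- stated objective: simpler
-- what changed: Replaces A's stateful cafe-index padding loop and the char-by-char enumerate loop with modulo colon insertion by a repeat-and-truncate pad of the hex text to 28 chars and a colon-join over its stride-4 slices.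
import Mathlib
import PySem

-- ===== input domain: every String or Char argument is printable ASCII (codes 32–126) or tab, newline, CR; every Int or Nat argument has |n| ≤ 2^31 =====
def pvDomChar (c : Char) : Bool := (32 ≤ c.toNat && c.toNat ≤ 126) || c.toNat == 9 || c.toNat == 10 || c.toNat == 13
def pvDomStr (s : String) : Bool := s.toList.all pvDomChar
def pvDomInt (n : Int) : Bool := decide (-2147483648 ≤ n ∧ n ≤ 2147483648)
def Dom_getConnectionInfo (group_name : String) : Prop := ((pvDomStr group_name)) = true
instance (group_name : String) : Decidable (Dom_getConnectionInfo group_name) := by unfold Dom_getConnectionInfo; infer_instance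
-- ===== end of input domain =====

-- B replaces A's stateful cafe-index padding loop and char-by-char colon insertion by a
-- repeat-and-truncate pad and a join over stride-4 chunks (objective: simpler; same cost).

-- ===== PORT A =====
-- binascii.hexlify(s.encode('utf-8')).decode() for ASCII input: two lowercase hex digits per char
-- (exact on Dom: every admitted char is a single UTF-8 byte)
def pvHexDigit (n : Nat) : Char := if n < 10 then Char.ofNat (48 + n) else Char.ofNat (87 + n)
def pvHexlifyL (l : List Char) : List Char := l.flatMap (fun c => [pvHexDigit (c.toNat / 16), pvHexDigit (c.toNat % 16)])
def pvHexlify (s : String) : List Char := pvHexlifyL s.toList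
-- int(h, 16) for a nonempty lowercase-hex digit string (exact there; both programs only parse such strings)
def pvHexVal (c : Char) : Int := if c.toNat ≤ 57 then (c.toNat : Int) - 48 else (c.toNat : Int) - 87
def pvParseHex (l : List Char) : Int := l.foldl (fun a c => 16 * a + pvHexVal c) 0

def getConnectionInfo (group_name : String) : Option String × Option Int :=
  if 5 < PySem.Str.len group_name then
    let text := pvHexlify group_name
    let port := pvParseHex (PySem.List.slice text (some ((text.length : Int) - 4)) (some (text.length : Int)))
    let port := port + 5000
    let cafe : List Char := ['c', 'a', 'f', 'e']
    let ip : List Char := ['f', 'f', '0', '5']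
    let lon : Int := (text.length : Int)
    let text := if 29 < lon then PySem.List.slice text (some 0) (some 28) else text
    let st := (PySem.List.pyRange 1 (29 - lon) 1).foldl
      (fun (p : List Char × Nat) i =>
        (p.1 ++ [cafe.getD p.2 ' '], if PySem.Int.mod i 4 == 0 then 0 else p.2 + 1))
      (text, 0)
    let ip := (PySem.List.enumerate st.1).foldl
      (fun acc (pr : Int × Char) =>
        if PySem.Int.mod pr.1 4 != 0 then acc ++ [pr.2] else acc ++ [':', pr.2]) ip
    (some (String.ofList ip), some port)
  else (none, none)

-- ===== PORT B =====
def pvCafe7 : List Char := "cafecafecafecafecafecafecafe".toList  -- 'cafe' * 7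

def getConnectionInfo_alt (group_name : String) : Option String × Option Int :=
  if PySem.Str.len group_name ≤ 5 then (none, none)
  else
    let text := pvHexlify group_name
    let port := pvParseHex (PySem.List.slice text (some (-4)) none) + 5000
    let text := if 29 < (text.length : Int) then PySem.List.slice text none (some 28)
      else text ++ pvCafe7.take (28 - text.length)
    let chunks := (PySem.List.pyRange 0 28 4).map (fun i => PySem.List.slice text (some i) (some (i + 4)))
    (some (String.ofList (['f', 'f', '0', '5', ':'] ++ List.intercalate [':'] chunks)), some port)

-- ===== PRECONDITION & SPEC =====
def Spec_getConnectionInfo (group_name : String) (out : Option String × Option Int) : Prop := out = getConnectionInfo_alt group_name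
instance (group_name : String) (out : Option String × Option Int) : Decidable (Spec_getConnectionInfo group_name out) := by unfold Spec_getConnectionInfo; infer_instance

-- ===== CLAIM (what is proved, stated in full; the proofs are below) =====
def Claim_equal_getConnectionInfo : Prop := ∀ (group_name : String), Dom_getConnectionInfo group_name → Spec_getConnectionInfo group_name (getConnectionInfo group_name)

-- ===== LEMMAS AND PROOFS =====

lemma pvHexlifyL_length (l : List Char) : (pvHexlifyL l).length = 2 * l.length := by
  induction l with
  | nil => rfl
  | cons c t ih => simp only [pvHexlifyL, List.flatMap_cons, List.length_append, List.length_cons, List.length_nil] at *; omega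

lemma pvColon28Lit (a1 a2 a3 a4 a5 a6 a7 a8 a9 a10 a11 a12 a13 a14 a15 a16 a17 a18 a19 a20 a21 a22 a23 a24 a25 a26 a27 a28 : Char) :
    (PySem.List.enumerate [a1, a2, a3, a4, a5, a6, a7, a8, a9, a10, a11, a12, a13, a14, a15, a16, a17, a18, a19, a20, a21, a22, a23, a24, a25, a26, a27, a28]).foldl
      (fun acc (pr : Int × Char) =>
        if PySem.Int.mod pr.1 4 != 0 then acc ++ [pr.2] else acc ++ [':', pr.2]) ['f', 'f', '0', '5']
    = ['f', 'f', '0', '5', ':'] ++ List.intercalate [':']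
        ((PySem.List.pyRange 0 28 4).map (fun i => PySem.List.slice [a1, a2, a3, a4, a5, a6, a7, a8, a9, a10, a11, a12, a13, a14, a15, a16, a17, a18, a19, a20, a21, a22, a23, a24, a25, a26, a27, a28] (some i) (some (i + 4)))) := by
  have hr : PySem.List.pyRange 0 28 4 = [0, 4, 8, 12, 16, 20, 24] := by decide
  rw [hr]
  norm_num [PySem.List.enumerate, PySem.List.slice, PySem.List.clampIdx, PySem.Int.mod_eq_emod_of_pos, List.intercalate, List.intersperse]
  simp

lemma pvColon28 (L : List Char) (h : L.length = 28) :
    (PySem.List.enumerate L).foldl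
      (fun acc (pr : Int × Char) =>
        if PySem.Int.mod pr.1 4 != 0 then acc ++ [pr.2] else acc ++ [':', pr.2]) ['f', 'f', '0', '5']
    = ['f', 'f', '0', '5', ':'] ++ List.intercalate [':']
        ((PySem.List.pyRange 0 28 4).map (fun i => PySem.List.slice L (some i) (some (i + 4)))) := by
  cases L with
  | nil => simp only [List.length_nil] at h; omega
  | cons a1 L =>
  cases L with
  | nil => simp only [List.length_cons, List.length_nil] at h; omega
  | cons a2 L =>
  cases L with
  | nil => simp only [List.length_cons, List.length_nil] at h; omega
  | cons a3 L =>
  cases L with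
  | nil => simp only [List.length_cons, List.length_nil] at h; omega
  | cons a4 L =>
  cases L with
  | nil => simp only [List.length_cons, List.length_nil] at h; omega
  | cons a5 L =>
  cases L with
  | nil => simp only [List.length_cons, List.length_nil] at h; omega
  | cons a6 L =>
  cases L with
  | nil => simp only [List.length_cons, List.length_nil] at h; omega
  | cons a7 L =>
  cases L with
  | nil => simp only [List.length_cons, List.length_nil] at h; omega
  | cons a8 L =>
  cases L with
  | nil => simp only [List.length_cons, List.length_nil] at h; omega
  | cons a9 L =>
  cases L with
  | nil => simp only [List.length_cons, List.length_nil] at h; omega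
  | cons a10 L =>
  cases L with
  | nil => simp only [List.length_cons, List.length_nil] at h; omega
  | cons a11 L =>
  cases L with
  | nil => simp only [List.length_cons, List.length_nil] at h; omega
  | cons a12 L =>
  cases L with
  | nil => simp only [List.length_cons, List.length_nil] at h; omega
  | cons a13 L =>
  cases L with
  | nil => simp only [List.length_cons, List.length_nil] at h; omega
  | cons a14 L =>
  cases L with
  | nil => simp only [List.length_cons, List.length_nil] at h; omega
  | cons a15 L =>
  cases L with
  | nil => simp only [List.length_cons, List.length_nil] at h; omega
  | cons a16 L =>
  cases L with
  | nil => simp only [List.length_cons, List.length_nil] at h; omega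
  | cons a17 L =>
  cases L with
  | nil => simp only [List.length_cons, List.length_nil] at h; omega
  | cons a18 L =>
  cases L with
  | nil => simp only [List.length_cons, List.length_nil] at h; omega
  | cons a19 L =>
  cases L with
  | nil => simp only [List.length_cons, List.length_nil] at h; omega
  | cons a20 L =>
  cases L with
  | nil => simp only [List.length_cons, List.length_nil] at h; omega
  | cons a21 L =>
  cases L with
  | nil => simp only [List.length_cons, List.length_nil] at h; omega
  | cons a22 L =>
  cases L with
  | nil => simp only [List.length_cons, List.length_nil] at h; omega
  | cons a23 L =>
  cases L with
  | nil => simp only [List.length_cons, List.length_nil] at h; omega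
  | cons a24 L =>
  cases L with
  | nil => simp only [List.length_cons, List.length_nil] at h; omega
  | cons a25 L =>
  cases L with
  | nil => simp only [List.length_cons, List.length_nil] at h; omega
  | cons a26 L =>
  cases L with
  | nil => simp only [List.length_cons, List.length_nil] at h; omega
  | cons a27 L =>
  cases L with
  | nil => simp only [List.length_cons, List.length_nil] at h; omega
  | cons a28 L =>
  cases L with
  | cons x L => simp only [List.length_cons] at h; omega
  | nil => exact pvColon28Lit a1 a2 a3 a4 a5 a6 a7 a8 a9 a10 a11 a12 a13 a14 a15 a16 a17 a18 a19 a20 a21 a22 a23 a24 a25 a26 a27 a28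

lemma pvPad (t : List Char) (k : Nat) (hk : t.length = k) (h12 : 12 ≤ k) (h28 : k ≤ 28) :
    ((PySem.List.pyRange 1 (29 - (t.length : Int)) 1).foldl
      (fun (p : List Char × Nat) i => (p.1 ++ [(['c','a','f','e'] : List Char).getD p.2 ' '], if PySem.Int.mod i 4 == 0 then 0 else p.2 + 1)) (t, 0)).1
    = t ++ pvCafe7.take (28 - t.length) := by
  rw [hk]
  interval_cases k
  · have h1 : PySem.List.pyRange 1 (29 - ((12:Nat):Int)) 1 = [1, 2, 3, 4, 5, 6, 7, 8, 9, 10, 11, 12, 13, 14, 15, 16] := by decide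
    rw [h1]
    norm_num [PySem.Int.mod_eq_emod_of_pos, List.getD, pvCafe7]
    try decide
  · have h1 : PySem.List.pyRange 1 (29 - ((13:Nat):Int)) 1 = [1, 2, 3, 4, 5, 6, 7, 8, 9, 10, 11, 12, 13, 14, 15] := by decide
    rw [h1]
    norm_num [PySem.Int.mod_eq_emod_of_pos, List.getD, pvCafe7]
    try decide
  · have h1 : PySem.List.pyRange 1 (29 - ((14:Nat):Int)) 1 = [1, 2, 3, 4, 5, 6, 7, 8, 9, 10, 11, 12, 13, 14] := by decide
    rw [h1]
    norm_num [PySem.Int.mod_eq_emod_of_pos, List.getD, pvCafe7]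
    try decide
  · have h1 : PySem.List.pyRange 1 (29 - ((15:Nat):Int)) 1 = [1, 2, 3, 4, 5, 6, 7, 8, 9, 10, 11, 12, 13] := by decide
    rw [h1]
    norm_num [PySem.Int.mod_eq_emod_of_pos, List.getD, pvCafe7]
    try decide
  · have h1 : PySem.List.pyRange 1 (29 - ((16:Nat):Int)) 1 = [1, 2, 3, 4, 5, 6, 7, 8, 9, 10, 11, 12] := by decide
    rw [h1]
    norm_num [PySem.Int.mod_eq_emod_of_pos, List.getD, pvCafe7]
    try decide
  · have h1 : PySem.List.pyRange 1 (29 - ((17:Nat):Int)) 1 = [1, 2, 3, 4, 5, 6, 7, 8, 9, 10, 11] := by decide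
    rw [h1]
    norm_num [PySem.Int.mod_eq_emod_of_pos, List.getD, pvCafe7]
    try decide
  · have h1 : PySem.List.pyRange 1 (29 - ((18:Nat):Int)) 1 = [1, 2, 3, 4, 5, 6, 7, 8, 9, 10] := by decide
    rw [h1]
    norm_num [PySem.Int.mod_eq_emod_of_pos, List.getD, pvCafe7]
    try decide
  · have h1 : PySem.List.pyRange 1 (29 - ((19:Nat):Int)) 1 = [1, 2, 3, 4, 5, 6, 7, 8, 9] := by decide
    rw [h1]
    norm_num [PySem.Int.mod_eq_emod_of_pos, List.getD, pvCafe7]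
    try decide
  · have h1 : PySem.List.pyRange 1 (29 - ((20:Nat):Int)) 1 = [1, 2, 3, 4, 5, 6, 7, 8] := by decide
    rw [h1]
    norm_num [PySem.Int.mod_eq_emod_of_pos, List.getD, pvCafe7]
    try decide
  · have h1 : PySem.List.pyRange 1 (29 - ((21:Nat):Int)) 1 = [1, 2, 3, 4, 5, 6, 7] := by decide
    rw [h1]
    norm_num [PySem.Int.mod_eq_emod_of_pos, List.getD, pvCafe7]
    try decide
  · have h1 : PySem.List.pyRange 1 (29 - ((22:Nat):Int)) 1 = [1, 2, 3, 4, 5, 6] := by decide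
    rw [h1]
    norm_num [PySem.Int.mod_eq_emod_of_pos, List.getD, pvCafe7]
    try decide
  · have h1 : PySem.List.pyRange 1 (29 - ((23:Nat):Int)) 1 = [1, 2, 3, 4, 5] := by decide
    rw [h1]
    norm_num [PySem.Int.mod_eq_emod_of_pos, List.getD, pvCafe7]
    try decide
  · have h1 : PySem.List.pyRange 1 (29 - ((24:Nat):Int)) 1 = [1, 2, 3, 4] := by decide
    rw [h1]
    norm_num [PySem.Int.mod_eq_emod_of_pos, List.getD, pvCafe7]
    try decide
  · have h1 : PySem.List.pyRange 1 (29 - ((25:Nat):Int)) 1 = [1, 2, 3] := by decide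
    rw [h1]
    norm_num [PySem.Int.mod_eq_emod_of_pos, List.getD, pvCafe7]
    try decide
  · have h1 : PySem.List.pyRange 1 (29 - ((26:Nat):Int)) 1 = [1, 2] := by decide
    rw [h1]
    norm_num [PySem.Int.mod_eq_emod_of_pos, List.getD, pvCafe7]
    try decide
  · have h1 : PySem.List.pyRange 1 (29 - ((27:Nat):Int)) 1 = [1] := by decide
    rw [h1]
    norm_num [PySem.Int.mod_eq_emod_of_pos, List.getD, pvCafe7]
    try decide
  · have h1 : PySem.List.pyRange 1 (29 - ((28:Nat):Int)) 1 = [] := by decide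
    rw [h1]
    norm_num [PySem.Int.mod_eq_emod_of_pos, List.getD, pvCafe7]
    try decide

lemma pvSlice_last4 (t : List Char) (h : 4 ≤ t.length) :
    PySem.List.slice t (some ((t.length : Int) - 4)) (some (t.length : Int)) = PySem.List.slice t (some (-4)) none := by
  rw [PySem.List.slice_from_neg_ofNat t 4 (by norm_num)]
  have h4 : ((t.length : Int) - 4) = ((t.length - 4 : Nat) : Int) := by omega
  rw [h4, PySem.List.slice_natCast]
  have h5 : t.length - (t.length - 4) = 4 := by omega
  rw [h5]
  exact List.take_of_length_le (by simp; omega)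

-- ===== VERDICT (by name: the statement is the Claim_ definition above) =====
theorem getConnectionInfo_spec : Claim_equal_getConnectionInfo := by
  intro gn _
  unfold Spec_getConnectionInfo getConnectionInfo getConnectionInfo_alt
  simp only [PySem.Str.len_eq]
  by_cases h : 5 < (gn.toList.length : Int)
  · rw [if_pos h, if_neg (show ¬((gn.toList.length : Int) ≤ 5) by omega)]
    have ht : (pvHexlify gn).length = 2 * gn.toList.length := pvHexlifyL_length gn.toList
    generalize hT : pvHexlify gn = t at *
    generalize hM : gn.toList.length = m at h ht
    have hm6 : 6 ≤ m := by omega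
    rw [pvSlice_last4 t (by omega)]
    by_cases h29 : 29 < ((t.length : Int))
    · rw [if_pos h29, if_pos h29, PySem.List.pyRange_one_eq_nil (by omega), List.foldl_nil]
      simp only [PySem.List.slice_zero_start]
      have hlen : (PySem.List.slice t none (some 28)).length = 28 := by
        rw [PySem.List.slice_to t (by norm_num)]
        simp only [List.length_take]
        omega
      rw [pvColon28 _ hlen]
    · rw [if_neg h29, if_neg h29]
      rw [pvPad t (2 * m) ht (by omega) (by omega)]
      have hc : pvCafe7.length = 28 := by decide
      have hlen : (t ++ pvCafe7.take (28 - t.length)).length = 28 := by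
        simp only [List.length_append, List.length_take]
        omega
      rw [pvColon28 _ hlen]
  · rw [if_neg h, if_pos (by omega)]
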